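-- pv_equiv track=rewrite | github.com/andrewcousins7/adventofcode | 2021/3/binarydiagnostic.py | is_true_more_frequent
-- ===== SOURCE A (Python) =====
-- def is_true_more_frequent(array, index):
--     runningTotal = 0
--     for values in array:
--         if values[index]:
--             runningTotal += 1
--         else:
--             runningTotal -= 1
--     return runningTotal >= 0
-- ===== SOURCE B (Python) =====
-- def is_true_more_frequent(array, index):
--     # Sort the column descending (True first); the majority test is then just
--     # reading the median position of the sorted column.
--     column = sorted((values[index] for values in array), reverse=True)
--     if not column:
--         return True
--     return column[(len(column) - 1) // 2]
-- ===== Notes on version B (the rewrite author's own statement) =====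
-- stated objective: alternative
-- what changed: B extracts the column, sorts it descending and returns the element at the median position (len-1)//2, replacing A's signed running-balance loop with a sort-then-median-select algorithm; trues are a majority exactly when the median of the sorted column is True.
import Mathlib
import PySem

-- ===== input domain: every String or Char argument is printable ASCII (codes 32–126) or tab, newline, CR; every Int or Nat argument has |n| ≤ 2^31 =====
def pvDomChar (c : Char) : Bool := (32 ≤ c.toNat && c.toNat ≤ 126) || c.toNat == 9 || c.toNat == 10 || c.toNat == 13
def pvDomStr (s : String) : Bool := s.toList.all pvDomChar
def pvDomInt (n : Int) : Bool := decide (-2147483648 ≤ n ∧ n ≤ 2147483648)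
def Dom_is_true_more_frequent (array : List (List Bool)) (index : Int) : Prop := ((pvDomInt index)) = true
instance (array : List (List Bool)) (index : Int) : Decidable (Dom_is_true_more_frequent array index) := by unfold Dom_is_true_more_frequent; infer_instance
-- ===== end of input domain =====

-- ===== PORT A =====
-- B replaces A's signed running-balance loop with sort-column-descending-then-read-the-median (objective: alternative).
-- Port of A: signed running balance over the rows; Option state mirrors Python's IndexError (none) from values[index].
def is_true_more_frequent (array : List (List Bool)) (index : Int) : Bool :=
  match array.foldl (fun acc values =>
      match acc, PySem.List.pyGet? values index with
      | some t, some v => some (if v then t + 1 else t - 1)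
      | _, _ => none) (some (0 : Int)) with
  | some t => decide (t ≥ 0)
  | none => false

-- ===== PORT B =====
-- The generator (values[index] for values in array), materialised by sorted(); none = IndexError.
def pvColumn (array : List (List Bool)) (index : Int) : Option (List Bool) :=
  match array with
  | [] => some []
  | v :: rest =>
    (PySem.List.pyGet? v index).bind fun b => (pvColumn rest index).map fun t => b :: t

-- Port of B: sort the column descending, return the element at the median position (len-1)//2.
def is_true_more_frequent_alt (array : List (List Bool)) (index : Int) : Bool :=
  match pvColumn array index with
  | none => false
  | some col =>
    match PySem.List.sorted col (fun x => x) true with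
    | [] => true
    | column@(_ :: _) =>
      PySem.List.pyGetD column (PySem.Int.floordiv ((column.length : Int) - 1) 2) false

-- ===== PRECONDITION & SPEC =====
-- Pre_ excludes exactly the inputs where values[index] raises IndexError in A (and in B alike).
def Pre_is_true_more_frequent (array : List (List Bool)) (index : Int) : Prop :=
  ∀ values ∈ array, PySem.Raise.InRange values.length index
instance (array : List (List Bool)) (index : Int) : Decidable (Pre_is_true_more_frequent array index) := by
  unfold Pre_is_true_more_frequent; infer_instance
def pvWitness_is_true_more_frequent : List (List Bool) × Int := ([[true, false], [false, true]], 0)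
def Spec_is_true_more_frequent (array : List (List Bool)) (index : Int) (out : Bool) : Prop := out = is_true_more_frequent_alt array index
instance (array : List (List Bool)) (index : Int) (out : Bool) : Decidable (Spec_is_true_more_frequent array index out) := by unfold Spec_is_true_more_frequent; infer_instance

-- ===== CLAIM (what is proved, stated in full; the proofs are below) =====
def Claim_equal_is_true_more_frequent : Prop := ∀ (array : List (List Bool)) (index : Int), Dom_is_true_more_frequent array index → Pre_is_true_more_frequent array index → Spec_is_true_more_frequent array index (is_true_more_frequent array index)

-- ===== LEMMAS AND PROOFS =====

-- Under Pre_, the column exists and is the map of the index-th entries.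
theorem pv_column_some (array : List (List Bool)) (index : Int)
    (h : ∀ values ∈ array, PySem.Raise.InRange values.length index) :
    pvColumn array index = some (array.map (fun v => (PySem.List.pyGet? v index).getD false)) := by
  induction array with
  | nil => rfl
  | cons x xs ih =>
    have hx : PySem.Raise.InRange x.length index := h x (List.mem_cons_self ..)
    obtain ⟨b, hb⟩ : ∃ b, PySem.List.pyGet? x index = some b := by
      cases hv : PySem.List.pyGet? x index with
      | none => exact absurd ((PySem.List.pyGet?_eq_none_iff x index).1 hv) (not_not_intro hx)
      | some b => exact ⟨b, rfl⟩
    simp [pvColumn, hb, ih (fun v hv => h v (List.mem_cons_of_mem _ hv))]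

-- A's fold from `some t` returns `some (t + 2*trues - length)` where trues counts true entries.
theorem pv_fold_A (index : Int) (array : List (List Bool))
    (h : ∀ values ∈ array, PySem.Raise.InRange values.length index) (t : Int) :
    array.foldl (fun acc values =>
        match acc, PySem.List.pyGet? values index with
        | some t, some v => some (if v then t + 1 else t - 1)
        | _, _ => none) (some t)
      = some (t + 2 * ((array.countP (fun v => (PySem.List.pyGet? v index).getD false)) : Int)
                - (array.length : Int)) := by
  induction array generalizing t with
  | nil => simp
  | cons x xs ih =>
    have hx : PySem.Raise.InRange x.length index := h x (List.mem_cons_self ..)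
    obtain ⟨b, hb⟩ : ∃ b, PySem.List.pyGet? x index = some b := by
      cases hv : PySem.List.pyGet? x index with
      | none => exact absurd ((PySem.List.pyGet?_eq_none_iff x index).1 hv) (not_not_intro hx)
      | some b => exact ⟨b, rfl⟩
    have h' : ∀ values ∈ xs, PySem.Raise.InRange values.length index :=
      fun v hv => h v (List.mem_cons_of_mem _ hv)
    simp only [List.foldl_cons, hb, List.countP_cons, Option.getD_some]
    cases b with
    | true =>
      simp only [if_pos trivial]
      rw [ih h' (t + 1)]; congr 1; push_cast [List.length_cons]; ring
    | false =>
      simp only [if_neg Bool.false_ne_true]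
      rw [ih h' (t - 1)]; congr 1; push_cast [List.length_cons]; ring

-- Inserting false into a true-block ++ false-block appends it to the falses.
theorem pv_insert_false (t f : Nat) :
    PySem.List.insertBy (fun a c => decide (c < a)) false
        (List.replicate t true ++ List.replicate f false)
      = List.replicate t true ++ List.replicate (f + 1) false := by
  induction t with
  | zero =>
    simp only [List.replicate_zero, List.nil_append]
    induction f with
    | zero => rfl
    | succ f ihf => simpa [PySem.List.insertBy, List.replicate_succ] using ihf
  | succ t iht =>
    simp only [List.replicate_succ, List.cons_append, PySem.List.insertBy]
    rw [if_neg (by decide)]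
    simp [iht, List.replicate_succ]

-- Inserting true puts it at the front of the true block.
theorem pv_insert_true (t f : Nat) :
    PySem.List.insertBy (fun a c => decide (c < a)) true
        (List.replicate t true ++ List.replicate f false)
      = List.replicate (t + 1) true ++ List.replicate f false := by
  induction t with
  | zero =>
    cases f with
    | zero => rfl
    | succ f => simp [PySem.List.insertBy, List.replicate_succ]
  | succ t iht => simpa [PySem.List.insertBy, List.replicate_succ] using iht

-- Descending sort of a bool list is its trues followed by its falses.
theorem pv_sorted_shape (col : List Bool) :
    PySem.List.sorted col (fun x => x) true
      = List.replicate (col.countP (fun x => x)) true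
          ++ List.replicate (col.length - col.countP (fun x => x)) false := by
  have step : ∀ (l : List Bool) (t f : Nat),
      l.foldl (fun acc x => PySem.List.insertBy (fun a c => decide (c < a)) x acc)
          (List.replicate t true ++ List.replicate f false)
        = List.replicate (t + l.countP (fun x => x)) true
            ++ List.replicate (f + (l.length - l.countP (fun x => x))) false := by
    intro l
    induction l with
    | nil => intro t f; simp
    | cons x xs ih =>
      intro t f
      have hc : xs.countP (fun x => x) ≤ xs.length := List.countP_le_length
      cases x with
      | true =>
        rw [List.foldl_cons, pv_insert_true, ih (t + 1) f]
        simp only [List.countP_cons, List.length_cons, if_pos trivial]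
        congr 2 <;> omega
      | false =>
        rw [List.foldl_cons, pv_insert_false, ih t (f + 1)]
        simp only [List.countP_cons, List.length_cons]
        rw [if_neg Bool.false_ne_true]
        congr 2 <;> omega
  have h0 := step col 0 0
  simp only [List.replicate_zero, List.nil_append, Nat.zero_add] at h0
  simpa [PySem.List.sorted] using h0

-- ===== VERDICT (by name: the statement is the Claim_ definition above) =====
theorem is_true_more_frequent_spec : Claim_equal_is_true_more_frequent := by
  intro array index _ hpre
  unfold Spec_is_true_more_frequent
  have hA : is_true_more_frequent array index
      = decide ((0:Int) + 2 * ((array.countP (fun v => (PySem.List.pyGet? v index).getD false)) : Int)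
          - (array.length : Int) ≥ 0) := by
    unfold is_true_more_frequent
    rw [pv_fold_A index array hpre 0]
  have hB0 : is_true_more_frequent_alt array index
      = (match PySem.List.sorted (array.map (fun v => (PySem.List.pyGet? v index).getD false)) (fun x => x) true with
         | [] => true
         | column@(_ :: _) =>
           PySem.List.pyGetD column (PySem.Int.floordiv ((column.length : Int) - 1) 2) false) := by
    unfold is_true_more_frequent_alt
    rw [pv_column_some array index hpre]
  have hcount : array.countP (fun v => (PySem.List.pyGet? v index).getD false)
      = (array.map (fun v => (PySem.List.pyGet? v index).getD false)).countP (fun x => x) := by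
    rw [List.countP_map]; rfl
  have hlen : array.length = (array.map (fun v => (PySem.List.pyGet? v index).getD false)).length := by
    simp
  rw [hA, hB0, pv_sorted_shape, hcount, hlen]
  generalize (array.map (fun v => (PySem.List.pyGet? v index).getD false)) = col
  have htn : col.countP (fun x => x) ≤ col.length := List.countP_le_length
  generalize hT : col.countP (fun x => x) = t at htn ⊢
  generalize hN : col.length = n at htn ⊢
  cases hnil : List.replicate t true ++ List.replicate (n - t) false with
  | nil =>
    have hlen0 := congrArg List.length hnil
    simp only [List.length_append, List.length_replicate, List.length_nil] at hlen0
    have hn0 : n = 0 := by omega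
    have ht0 : t = 0 := by omega
    simp [hn0, ht0]
  | cons y ys =>
    have hlen2 : (y :: ys).length = n := by
      have := congrArg List.length hnil
      simp only [List.length_append, List.length_replicate] at this
      omega
    simp only []
    rw [hlen2, ← hnil]
    have hn1 : (1:Nat) ≤ n := by simp at hlen2; omega
    have hfd : PySem.Int.floordiv ((n:Int) - 1) 2 = (((n - 1) / 2 : Nat) : Int) := by
      rw [show ((n:Int) - 1) = ((n - 1 : Nat) : Int) by omega]
      exact_mod_cast PySem.Int.floordiv_natCast (n - 1) 2
    rw [hfd, PySem.List.pyGetD_natCast]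
    have hm : (n - 1) / 2 < (List.replicate t true ++ List.replicate (n - t) false).length := by
      simp only [List.length_append, List.length_replicate]; omega
    rw [List.getD_eq_getElem _ _ hm]
    by_cases hmaj : (n - 1) / 2 < t
    · have he : (List.replicate t true ++ List.replicate (n - t) false)[(n-1)/2]'hm = true := by
        rw [List.getElem_append_left (by simpa using hmaj)]
        simp
      rw [he]
      simp only [ge_iff_le, decide_eq_true_eq]
      omega
    · have hmt : t ≤ (n - 1) / 2 := by omega
      have he : (List.replicate t true ++ List.replicate (n - t) false)[(n-1)/2]'hm = false := by
        rw [List.getElem_append_right (by simpa using hmt)]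
        simp
      rw [he]
      simp only [ge_iff_le, decide_eq_false_iff_not]
      omega
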